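-- pv_equiv track=rewrite | github.com/YAAA-AI/NGRAM_Capstone | ngram-predictor/src/model/ngram_model.py | _build_context_index
-- ===== SOURCE A (Python) =====
-- from collections import Counter, defaultdict
--
-- def _build_context_index(ngram_counts):
--     """Build a lookup index mapping (n-1)-word contexts to candidate next words.
--
--     Args:
--         ngram_counts: Counter of n-gram tuples.
--
--     Returns:
--         Dict mapping context tuples to sorted (word, count) lists.
--     """
--     context_index = defaultdict(list)
--     for ngram, count in ngram_counts.items():
--         context = ngram[:-1]
--         context_index[context].append((ngram[-1], count))
--     for context in context_index:
--         context_index[context].sort(key=lambda x: x[1], reverse=True)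
--     return dict(context_index)
-- ===== SOURCE B (Python) =====
-- def _build_context_index(ngram_counts):
--     """Build a lookup index mapping (n-1)-word contexts to candidate next words.
--
--     One global stable sort by count (descending), then a single grouping pass:
--     stability means each context's slice of the ranked list is already in the
--     order A's per-context sorts produce.  Keys are pre-seeded in first-occurrence
--     order so the returned dict has the same key order as A's.
--     """
--     ranked = sorted(ngram_counts.items(), key=lambda x: x[1], reverse=True)
--     index = {ngram[:-1]: [] for ngram in ngram_counts}
--     for ngram, count in ranked:
--         index[ngram[:-1]].append((ngram[-1], count))
--     return index
-- ===== Notes on version B (the rewrite author's own statement) =====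
-- stated objective: alternative
-- what changed: Replaces the per-context sorts (group first, then sort each candidate list) by one global stable sort of the items by count descending followed by a single linear grouping pass into pre-seeded keys; stability of the global sort yields each context's list in exactly A's order.
import Mathlib
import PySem

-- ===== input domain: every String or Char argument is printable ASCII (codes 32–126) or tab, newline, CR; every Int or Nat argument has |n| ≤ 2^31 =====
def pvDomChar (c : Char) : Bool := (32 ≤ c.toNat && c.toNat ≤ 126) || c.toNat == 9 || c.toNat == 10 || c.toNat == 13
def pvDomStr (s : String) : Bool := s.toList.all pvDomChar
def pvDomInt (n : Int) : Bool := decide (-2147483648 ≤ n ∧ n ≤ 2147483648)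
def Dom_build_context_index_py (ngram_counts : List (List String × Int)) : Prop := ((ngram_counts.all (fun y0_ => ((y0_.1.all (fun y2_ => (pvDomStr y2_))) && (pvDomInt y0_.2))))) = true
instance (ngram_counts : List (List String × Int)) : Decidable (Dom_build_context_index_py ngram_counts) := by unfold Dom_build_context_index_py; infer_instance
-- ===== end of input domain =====

-- B replaces A's group-then-sort-each-bucket by one global stable sort by count
-- descending followed by a single grouping pass into pre-seeded keys (alternative
-- decomposition, same asymptotic cost).

-- ===== PORT A =====
-- literal transliteration of _build_context_index: defaultdict(list) append loop,
-- then an in-place sort of each context's list, then dict(context_index).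
-- ngram[-1] is ported as (pyGet? … (-1)).getD "": on a zero-length ngram Python raises
-- IndexError — those inputs are excluded by Pre_ below.
def build_context_index_py (ngram_counts : List (List String × Int)) : List (List String × List (String × Int)) :=
  let d := ngram_counts.foldl (fun d p =>
      d.modify (PySem.List.slice p.1 none (some (-1))) []
        (fun v => v ++ [((PySem.List.pyGet? p.1 (-1)).getD "", p.2)]))
    PySem.Dict.empty
  let d2 := d.keys.foldl (fun d2 c =>
      d2.insert c (PySem.List.sorted (d2.getD c []) (fun x => x.2) true)) d
  d2.items

-- ===== PORT B =====
-- literal transliteration of Source B: ranked = sorted(items, key=count, reverse=True);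
-- dict comprehension seeding every context with []; one grouping pass over ranked.
-- index[ngram[:-1]].append(…) is ported with Dict.modify; the key is always present
-- (seeded by the comprehension), so this is exact.
def build_context_index_py_alt (ngram_counts : List (List String × Int)) : List (List String × List (String × Int)) :=
  let ranked := PySem.List.sorted ngram_counts (fun x => x.2) true
  let index0 := ngram_counts.foldl (fun d p =>
      d.insert (PySem.List.slice p.1 none (some (-1))) []) PySem.Dict.empty
  let index := ranked.foldl (fun d p =>
      d.modify (PySem.List.slice p.1 none (some (-1))) []
        (fun v => v ++ [((PySem.List.pyGet? p.1 (-1)).getD "", p.2)])) index0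
  index.items

-- ===== PRECONDITION & SPEC =====
-- Pre_ excludes inputs containing a zero-length n-gram key: there Python's ngram[-1]
-- raises IndexError (in A and in B alike).
def Pre_build_context_index_py (ngram_counts : List (List String × Int)) : Prop :=
  (ngram_counts.all (fun p => !p.1.isEmpty)) = true
instance (ngram_counts : List (List String × Int)) : Decidable (Pre_build_context_index_py ngram_counts) := by unfold Pre_build_context_index_py; infer_instance

def pvWitness_build_context_index_py : (List (List String × Int)) :=
  [(["the", "cat"], 2), (["the", "dog"], 3), (["a", "cat"], 1)]

def Spec_build_context_index_py (ngram_counts : List (List String × Int)) (out : List (List String × List (String × Int))) : Prop := out = build_context_index_py_alt ngram_counts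
instance (ngram_counts : List (List String × Int)) (out : List (List String × List (String × Int))) : Decidable (Spec_build_context_index_py ngram_counts out) := by unfold Spec_build_context_index_py; infer_instance

-- ===== CLAIM (what is proved, stated in full; the proofs are below) =====
def Claim_equal_build_context_index_py : Prop := ∀ (ngram_counts : List (List String × Int)), Dom_build_context_index_py ngram_counts → Pre_build_context_index_py ngram_counts → Spec_build_context_index_py ngram_counts (build_context_index_py ngram_counts)

-- ===== LEMMAS AND PROOFS =====

-- the context key and the (word, count) value extracted from one item
def pvK (p : List String × Int) : List String := PySem.List.slice p.1 none (some (-1))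
def pvV (p : List String × Int) : String × Int := ((PySem.List.pyGet? p.1 (-1)).getD "", p.2)

-- updating a set with elements it already has changes nothing
lemma pv_update_self {κ : Type} [BEq κ] [LawfulBEq κ] (xs : List κ) (s : PySem.Set κ)
    (h : ∀ x ∈ xs, s.contains x = true) : PySem.Set.update s xs = s := by
  induction xs generalizing s with
  | nil => rfl
  | cons x xs ih =>
      have hx := h x (by simp)
      show PySem.Set.update (PySem.Set.add s x) xs = s
      rw [show PySem.Set.add s x = s by unfold PySem.Set.add; rw [hx]; simp]
      exact ih s (fun y hy => h y (by simp [hy]))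

-- a fold of inserts at keys not containing c leaves getD c unchanged
lemma pv_getD_foldl_insert_not_mem {κ : Type} [BEq κ] [LawfulBEq κ] [DecidableEq κ] {ν : Type}
    (g : List ν → List ν) (ks : List κ) (d : PySem.Dict κ (List ν)) (c : κ) (hc : c ∉ ks) :
    (ks.foldl (fun d2 x => d2.insert x (g (d2.getD x []))) d).getD c [] = d.getD c [] := by
  induction ks generalizing d with
  | nil => rfl
  | cons k ks ih =>
      have hck : c ≠ k := fun h => hc (by simp [h])
      simp only [List.foldl_cons]
      rw [ih _ (fun h => hc (by simp [h])), PySem.Dict.getD_insert]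
      simp [hck]

-- folding 'insert x (g (getD x))' over nodup keys applies g once to each key's value
lemma pv_getD_foldl_insert_mem {κ : Type} [BEq κ] [LawfulBEq κ] [DecidableEq κ] {ν : Type}
    (g : List ν → List ν) (ks : List κ) (d : PySem.Dict κ (List ν)) (c : κ)
    (hnd : ks.Nodup) (hc : c ∈ ks) :
    (ks.foldl (fun d2 x => d2.insert x (g (d2.getD x []))) d).getD c [] = g (d.getD c []) := by
  induction ks generalizing d with
  | nil => cases hc
  | cons k ks ih =>
      simp only [List.foldl_cons]
      rcases List.nodup_cons.mp hnd with ⟨hk, hnd'⟩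
      rcases List.mem_cons.mp hc with h | h
      · subst h
        rw [pv_getD_foldl_insert_not_mem g ks _ c hk]
        rw [PySem.Dict.getD_insert]
        simp
      · rw [ih _ hnd' h]
        have hck : c ≠ k := fun he => hk (he ▸ h)
        rw [PySem.Dict.getD_insert]
        simp [hck]

-- seeding keys with [] gives getD _ [] = [] everywhere
lemma pv_getD_seed {κ : Type} [BEq κ] [LawfulBEq κ] [DecidableEq κ] {α ν : Type} (kf : α → κ)
    (l : List α) (d : PySem.Dict κ (List ν)) (c : κ) (h : d.getD c [] = []) :
    (l.foldl (fun d p => d.insert (kf p) ([] : List ν)) d).getD c [] = [] := by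
  induction l generalizing d with
  | nil => exact h
  | cons p l ih =>
      simp only [List.foldl_cons]
      refine ih _ ?_
      rw [PySem.Dict.getD_insert]
      split <;> simp [h]

-- mapping through insertBy when the comparator factors through the map
lemma pv_map_insertBy {α β : Type} (f : α → β) (before : α → α → Bool) (before' : β → β → Bool)
    (h : ∀ a b, before' (f a) (f b) = before a b) (x : α) (acc : List α) :
    (PySem.List.insertBy before x acc).map f = PySem.List.insertBy before' (f x) (acc.map f) := by
  induction acc with
  | nil => simp [PySem.List.insertBy]
  | cons y ys ih =>
      simp only [PySem.List.insertBy, List.map_cons, h]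
      split <;> simp [List.map_cons, ih]

-- stable reverse sort commutes with map when the keys agree through the map
lemma pv_sorted_rev_map {α β κ : Type} [LT κ] [DecidableLT κ] (l : List α) (f : α → β)
    (key : α → κ) (key' : β → κ) (h : ∀ a, key' (f a) = key a) :
    PySem.List.sorted (l.map f) key' true = (PySem.List.sorted l key true).map f := by
  rw [PySem.List.sorted_rev_eq_foldl_insertBy, PySem.List.sorted_rev_eq_foldl_insertBy,
    List.foldl_map]
  suffices H : ∀ (acc : List α),
      l.foldl (fun acc p => PySem.List.insertBy (fun a b => decide (key' b < key' a)) (f p) acc) (acc.map f)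
        = (l.foldl (fun acc x => PySem.List.insertBy (fun a b => decide (key b < key a)) x acc) acc).map f by
    simpa using H []
  intro acc
  induction l generalizing acc with
  | nil => rfl
  | cons p l ih =>
      simp only [List.foldl_cons]
      rw [← pv_map_insertBy f (fun a b => decide (key b < key a))
            (fun a b => decide (key' b < key' a)) (fun a b => by simp [h]) p acc, ih]

-- inserting above everything (all keys strictly smaller) puts x in front
lemma pv_insertBy_front {α : Type} (before : α → α → Bool) (x : α) (l : List α)
    (h : ∀ y ∈ l, before x y = true) : PySem.List.insertBy before x l = x :: l := by
  cases l with
  | nil => rfl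
  | cons y ys => simp [PySem.List.insertBy, h y (by simp)]

-- filter commutes with insertBy into a descending-sorted accumulator
lemma pv_filter_insertBy {α κ : Type} [LinearOrder κ] (key : α → κ) (q : α → Bool) (x : α)
    (acc : List α) (hp : acc.Pairwise (fun a b => key b ≤ key a)) :
    (PySem.List.insertBy (fun a b => decide (key b < key a)) x acc).filter q =
      if q x then PySem.List.insertBy (fun a b => decide (key b < key a)) x (acc.filter q)
      else acc.filter q := by
  induction acc with
  | nil => cases hq : q x <;> simp [PySem.List.insertBy, hq]
  | cons y ys ih =>
      rcases List.pairwise_cons.mp hp with ⟨hhead, hys⟩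
      by_cases hb : key y < key x
      · rw [show PySem.List.insertBy (fun a b => decide (key b < key a)) x (y :: ys) = x :: y :: ys by
          simp [PySem.List.insertBy, hb]]
        cases hq : q x with
        | false => simp [List.filter_cons, hq]
        | true =>
            rw [pv_insertBy_front _ x ((y :: ys).filter q) ?_]
            · simp [List.filter_cons, hq]
            · intro z hz
              have hz' : z ∈ y :: ys := List.mem_of_mem_filter hz
              have : key z ≤ key y := by
                rcases List.mem_cons.mp hz' with h | h
                · exact le_of_eq (by rw [h])
                · exact hhead z h
              simp [lt_of_le_of_lt this hb]
      · rw [show PySem.List.insertBy (fun a b => decide (key b < key a)) x (y :: ys)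
            = y :: PySem.List.insertBy (fun a b => decide (key b < key a)) x ys by
          simp [PySem.List.insertBy, hb]]
        rw [List.filter_cons, List.filter_cons]
        cases hqy : q y <;> cases hqx : q x <;>
          simp_all [ih hys, PySem.List.insertBy]

-- stable reverse sort commutes with filter
lemma pv_sorted_rev_filter {α κ : Type} [LinearOrder κ] (l : List α) (key : α → κ) (q : α → Bool) :
    PySem.List.sorted (l.filter q) key true = (PySem.List.sorted l key true).filter q := by
  induction l using List.reverseRecOn with
  | nil => simp [PySem.List.sorted_rev_eq_foldl_insertBy]
  | append_singleton l x ih =>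
      rw [PySem.List.sorted_rev_eq_foldl_insertBy, List.filter_append, List.foldl_append,
        ← PySem.List.sorted_rev_eq_foldl_insertBy,
        PySem.List.sorted_rev_eq_foldl_insertBy (l ++ [x]), List.foldl_append,
        ← PySem.List.sorted_rev_eq_foldl_insertBy]
      have hpair := PySem.List.sorted_pairwise_rev (xs := l) (key := key)
      cases hq : q x with
      | true =>
          simp only [List.filter_cons, hq, List.filter_nil, List.foldl_cons, List.foldl_nil]
          rw [ih, pv_filter_insertBy key q x _ hpair, hq]
          simp
      | false =>
          simp only [List.filter_cons, hq, Bool.false_eq_true, if_false, List.filter_nil,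
            List.foldl_nil, List.foldl_cons]
          rw [ih, pv_filter_insertBy key q x _ hpair, hq]
          simp

-- phase-1 grouping fold, rewritten over the mapped (key, value) list
lemma pv_fold_map (l : List (List String × Int)) (d : PySem.Dict (List String) (List (String × Int))) :
    l.foldl (fun d p =>
        d.modify (PySem.List.slice p.1 none (some (-1))) []
          (fun v => v ++ [((PySem.List.pyGet? p.1 (-1)).getD "", p.2)])) d
      = (l.map (fun p => (pvK p, pvV p))).foldl (fun d q => d.modify q.1 [] (fun v => v ++ [q.2])) d := by
  rw [List.foldl_map]; rfl

-- characterization of port A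
set_option maxHeartbeats 1000000 in
lemma pv_A_eq (l : List (List String × Int)) :
    build_context_index_py l =
      (PySem.Set.ofList (l.map pvK)).map (fun c =>
        (c, PySem.List.sorted (((l.map (fun p => (pvK p, pvV p))).filter (fun e => e.1 == c)).map (fun e => e.2))
              (fun x => x.2) true)) := by
  unfold build_context_index_py
  dsimp only
  rw [pv_fold_map]
  set es := l.map (fun p => (pvK p, pvV p)) with hes
  set d := es.foldl (fun d q => d.modify q.1 [] (fun v => v ++ [q.2])) PySem.Dict.empty with hd
  have hkeys : d.keys = PySem.Set.ofList (l.map pvK) := by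
    rw [hd, PySem.Dict.keys_foldl_modify_key es (fun q => q.1) [] (fun _ q v => v ++ [q.2])]
    rw [PySem.Dict.keys_empty]
    show PySem.Set.ofList (es.map (fun q => q.1)) = _
    rw [hes, List.map_map]
    rfl
  have hnd : d.keys.Nodup := by
    rw [hd]
    exact PySem.Dict.nodup_keys_foldl_modify_key es (fun q => q.1) [] (fun _ q v => v ++ [q.2]) _
      (by simp [PySem.Dict.keys_empty])
  set d2 := d.keys.foldl (fun d2 c =>
      d2.insert c (PySem.List.sorted (d2.getD c []) (fun x => x.2) true)) d with hd2
  have hkeys2 : d2.keys = d.keys := by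
    rw [hd2, PySem.Dict.keys_foldl_insert d.keys
      (fun d2 c => PySem.List.sorted (d2.getD c []) (fun x => x.2) true) d]
    exact pv_update_self d.keys d.keys (fun x hx => by simpa using hx)
  have hitems : d2.items = d2.keys.map (fun c => (c, d2.getD c [])) := by
    exact PySem.Dict.items_eq_map_keys d2 (hkeys2 ▸ hnd) []
  rw [hitems, hkeys2, hkeys]
  refine List.map_congr_left (fun c hc => ?_)
  refine congrArg (Prod.mk c) ?_
  have hmem : c ∈ d.keys := hkeys ▸ hc
  have h1 : d2.getD c [] = PySem.List.sorted (d.getD c []) (fun x => x.2) true := by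
    rw [hd2]
    exact pv_getD_foldl_insert_mem (fun v => PySem.List.sorted v (fun x => x.2) true)
      d.keys d c hnd hmem
  have h2 : d.getD c [] = (es.filter (fun e => e.1 == c)).map (fun e => e.2) := by
    rw [hd]
    rw [PySem.Dict.getD_foldl_modify_append es PySem.Dict.empty c]
    simp [PySem.Dict.getD_empty]
  rw [h1, h2]

-- characterization of port B
set_option maxHeartbeats 1000000 in
lemma pv_B_eq (l : List (List String × Int)) :
    build_context_index_py_alt l =
      (PySem.Set.ofList (l.map pvK)).map (fun c =>
        (c, (((PySem.List.sorted l (fun x => x.2) true).map (fun p => (pvK p, pvV p))).filter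
              (fun e => e.1 == c)).map (fun e => e.2))) := by
  unfold build_context_index_py_alt
  dsimp only
  rw [pv_fold_map]
  set ranked := PySem.List.sorted l (fun x => x.2) true with hranked
  set es := ranked.map (fun p => (pvK p, pvV p)) with hes
  set d0 := l.foldl (fun d p => d.insert (PySem.List.slice p.1 none (some (-1))) []) PySem.Dict.empty with hd0
  have hkeys0 : d0.keys = PySem.Set.ofList (l.map pvK) := by
    rw [hd0, PySem.Dict.keys_foldl_insert_key l (fun p => PySem.List.slice p.1 none (some (-1)))
      (fun _ _ => []) PySem.Dict.empty, PySem.Dict.keys_empty]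
    rfl
  have hnd0 : d0.keys.Nodup := by
    rw [hd0]
    exact PySem.Dict.nodup_keys_foldl_insert_key l (fun p => PySem.List.slice p.1 none (some (-1)))
      (fun _ _ => []) _ (by simp [PySem.Dict.keys_empty])
  set d := es.foldl (fun d q => d.modify q.1 [] (fun v => v ++ [q.2])) d0 with hd
  have hkeys : d.keys = d0.keys := by
    rw [hd, PySem.Dict.keys_foldl_modify_key es (fun q => q.1) [] (fun _ q v => v ++ [q.2]) d0]
    refine pv_update_self _ d0.keys (fun x hx => ?_)
    rw [hkeys0]
    have : x ∈ l.map pvK := by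
      rw [hes, List.map_map] at hx
      rcases List.mem_map.mp hx with ⟨p, hp, hpx⟩
      exact List.mem_map.mpr ⟨p, (PySem.List.sorted_perm l (fun x => x.2) true).mem_iff.mp hp, hpx⟩
    simpa using (PySem.Set.mem_ofList (l.map pvK) x).mpr this
  have hnd : d.keys.Nodup := hkeys ▸ hnd0
  have hitems : d.items = d.keys.map (fun c => (c, d.getD c [])) :=
    PySem.Dict.items_eq_map_keys d hnd []
  rw [hitems, hkeys, hkeys0]
  refine List.map_congr_left (fun c hc => ?_)
  refine congrArg (Prod.mk c) ?_
  have h2 : d.getD c [] = d0.getD c [] ++ (es.filter (fun e => e.1 == c)).map (fun e => e.2) := by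
    rw [hd]; exact PySem.Dict.getD_foldl_modify_append es d0 c
  have h0 : d0.getD c [] = [] := by
    rw [hd0]
    apply pv_getD_seed (κ := List String) (α := List String × Int) (ν := String × Int)
      (fun p => PySem.List.slice p.1 none (some (-1))) l PySem.Dict.empty c
    exact PySem.Dict.getD_empty c []
  rw [h2, h0, List.nil_append]

-- ===== VERDICT (by name: the statement is the Claim_ definition above) =====
theorem build_context_index_py_spec : Claim_equal_build_context_index_py := by
  intro l _ _
  show build_context_index_py l = build_context_index_py_alt l
  rw [pv_A_eq, pv_B_eq]
  refine List.map_congr_left (fun c _ => ?_)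
  refine congrArg (Prod.mk c) ?_
  rw [← pv_sorted_rev_map l (fun p => (pvK p, pvV p)) (fun p => p.2) (fun e => e.2.2) (fun a => rfl),
      ← pv_sorted_rev_filter]
  exact pv_sorted_rev_map ((l.map (fun p => (pvK p, pvV p))).filter (fun e => e.1 == c))
    (fun e : List String × (String × Int) => e.2) (fun e => e.2.2) (fun x => x.2) (fun a => rfl)
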